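-- pv_equiv track=rewrite | github.com/jong-seoung/BaekJoon | 프로그래머스/0/120956. 옹알이 （1）/옹알이 （1）.py | solution
-- ===== SOURCE A (Python) =====
-- def solution(babbling):
--     lst = ['aya','ye','woo','ma']
--     answer = 0
--     for i in babbling:
--         for j in lst:
--             i = i.replace(j,'1')
--         i = i.replace('1','')
--         if i == '':
--             answer+=1
--     return answer
-- ===== SOURCE B (Python) =====
-- def solution(babbling):
--     answer = 0
--     for word in babbling:
--         i, n = 0, len(word)
--         ok = True
--         while i < n:
--             if word.startswith('aya', i):
--                 i += 3
--             elif word.startswith('ye', i):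
--                 i += 2
--             elif word.startswith('woo', i):
--                 i += 3
--             elif word.startswith('ma', i):
--                 i += 2
--             else:
--                 ok = False
--                 break
--         if ok:
--             answer += 1
--     return answer
-- ===== Notes on version B (the rewrite author's own statement) =====
-- stated objective: alternative
-- what changed: B counts a word by a single left-to-right scan that consumes one babbling unit at the current position and fails fast, instead of A's four whole-string str.replace passes with a '1' sentinel plus a final deletion pass.
-- intended difference: On lists containing a word that is a concatenation of the four units and at least one literal '1' character (e.g. '1' or 'aya1'), A counts that word because its '1' replacement sentinel collides with input characters, while B does not count it; B's value is intended since '1' is not a babbling unit. — e.g. on solution(["1"]): A returns 1, B returns 0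
import Mathlib
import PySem

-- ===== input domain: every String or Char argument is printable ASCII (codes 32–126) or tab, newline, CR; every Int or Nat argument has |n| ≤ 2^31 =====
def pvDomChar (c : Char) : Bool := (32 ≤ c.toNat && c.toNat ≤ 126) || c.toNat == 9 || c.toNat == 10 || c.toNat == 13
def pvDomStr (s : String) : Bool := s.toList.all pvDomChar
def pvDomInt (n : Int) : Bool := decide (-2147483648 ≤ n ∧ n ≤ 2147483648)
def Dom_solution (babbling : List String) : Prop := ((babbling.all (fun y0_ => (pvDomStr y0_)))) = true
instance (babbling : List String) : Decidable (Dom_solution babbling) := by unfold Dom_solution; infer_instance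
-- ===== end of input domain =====

-- B re-implements the count by scanning each word once left-to-right, consuming one babbling
-- unit at a time and failing fast, instead of A's four whole-string replace passes plus a
-- deletion pass (objective: alternative algorithm; not measurably faster in Python).

-- ===== PORT A =====
def solution (babbling : List String) : Int :=
  babbling.foldl (fun answer i =>
    let i2 := (["aya", "ye", "woo", "ma"] : List String).foldl
      (fun i j => PySem.Str.replace i j "1") i
    let i3 := PySem.Str.replace i2 "1" ""
    if i3 = "" then answer + 1 else answer) 0

-- ===== PORT B =====
-- the per-word while loop of Source B: consume one unit at the current position, else fail
def altLoop : List Char → Bool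
  | 'a' :: 'y' :: 'a' :: rest => altLoop rest
  | 'y' :: 'e' :: rest => altLoop rest
  | 'w' :: 'o' :: 'o' :: rest => altLoop rest
  | 'm' :: 'a' :: rest => altLoop rest
  | [] => true
  | _ => false

def solution_alt (babbling : List String) : Int :=
  babbling.foldl (fun answer word => if altLoop word.toList then answer + 1 else answer) 0

-- ===== PRECONDITION & SPEC =====
-- the regular language (aya|ye|woo|ma|1)* : concatenations of the four babbling units
-- and of the literal character '1' (A's replacement sentinel)
def unitsRE : RegularExpression Char :=
  (RegularExpression.char 'a' * RegularExpression.char 'y' * RegularExpression.char 'a' +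
   RegularExpression.char 'y' * RegularExpression.char 'e' +
   RegularExpression.char 'w' * RegularExpression.char 'o' * RegularExpression.char 'o' +
   RegularExpression.char 'm' * RegularExpression.char 'a' +
   RegularExpression.char '1').star

-- On lists containing a word made of the four units plus at least one literal '1' character
-- (e.g. "1" or "aya1"), A counts that word because its '1' replacement sentinel collides with
-- input characters, while B does not count it — intended, since '1' is not a babbling unit.
def D_solution (babbling : List String) : Prop :=
  ∃ w ∈ babbling, ('1' : Char) ∈ w.toList ∧ unitsRE.rmatch w.toList = true
instance (babbling : List String) : Decidable (D_solution babbling) := by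
  unfold D_solution; infer_instance

def Spec_solution (babbling : List String) (out : Int) : Prop :=
  ¬ D_solution babbling → out = solution_alt babbling
instance (babbling : List String) (out : Int) : Decidable (Spec_solution babbling out) := by
  unfold Spec_solution; infer_instance

def pvDiffWitness_solution : List String := ["1"]
def pvDiffWitnessOut_solution : Int × Int := (1, 0)

-- ===== CLAIM (what is proved, stated in full; the proofs are below) =====
def Claim_unchanged_solution : Prop :=
  ∀ (babbling : List String), Dom_solution babbling → Spec_solution babbling (solution babbling)
def Claim_changed_solution : Prop :=
  Dom_solution (pvDiffWitness_solution) ∧ D_solution (pvDiffWitness_solution) ∧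
  solution (pvDiffWitness_solution) = pvDiffWitnessOut_solution.1 ∧
  solution_alt (pvDiffWitness_solution) = pvDiffWitnessOut_solution.2 ∧
  pvDiffWitnessOut_solution.1 ≠ pvDiffWitnessOut_solution.2
def Claim_exact_solution : Prop :=
  ∀ (babbling : List String), Dom_solution babbling → D_solution babbling →
    solution babbling ≠ solution_alt babbling

-- ===== LEMMAS AND PROOFS =====

-- proof-internal Bool recognizer of the language of unitsRE (bridge between the two ports)
def tiled1 : List Char → Bool
  | '1' :: rest => tiled1 rest
  | 'a' :: 'y' :: 'a' :: rest => tiled1 rest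
  | 'y' :: 'e' :: rest => tiled1 rest
  | 'w' :: 'o' :: 'o' :: rest => tiled1 rest
  | 'm' :: 'a' :: rest => tiled1 rest
  | [] => true
  | _ => false

lemma units_matches (x : List Char) :
    x ∈ (RegularExpression.char 'a' * RegularExpression.char 'y' * RegularExpression.char 'a' +
      RegularExpression.char 'y' * RegularExpression.char 'e' +
      RegularExpression.char 'w' * RegularExpression.char 'o' * RegularExpression.char 'o' +
      RegularExpression.char 'm' * RegularExpression.char 'a' +
      RegularExpression.char '1').matches' ↔
    x = ['a','y','a'] ∨ x = ['y','e'] ∨ x = ['w','o','o'] ∨ x = ['m','a'] ∨ x = ['1'] := by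
  simp [Language.mem_add, Language.mem_mul, eq_comm]
  constructor
  · rintro ((((⟨a, b, ⟨rfl, rfl⟩, c, rfl, rfl⟩ | ⟨a, rfl, b, rfl, rfl⟩) |
      ⟨a, b, ⟨rfl, rfl⟩, c, rfl, rfl⟩) | ⟨a, rfl, b, rfl, rfl⟩) | rfl) <;> simp
  · rintro (rfl | rfl | rfl | rfl | rfl)
    · exact Or.inl (Or.inl (Or.inl (Or.inl ⟨['a'], ['y'], ⟨rfl, rfl⟩, ['a'], rfl, rfl⟩)))
    · exact Or.inl (Or.inl (Or.inl (Or.inr ⟨['y'], rfl, ['e'], rfl, rfl⟩)))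
    · exact Or.inl (Or.inl (Or.inr ⟨['w'], ['o'], ⟨rfl, rfl⟩, ['o'], rfl, rfl⟩))
    · exact Or.inl (Or.inr ⟨['m'], rfl, ['a'], rfl, rfl⟩)
    · exact Or.inr rfl

-- a clean recursive reformulation of PySem.Chars.replace (for old ≠ [])
def rep (old new l : List Char) : List Char :=
  match l with
  | [] => []
  | c :: t =>
    if h : old ≠ [] ∧ old.isPrefixOf (c :: t) then new ++ rep old new (List.drop old.length (c :: t))
    else c :: rep old new t
termination_by l.length
decreasing_by
  · have := List.length_pos_of_ne_nil h.1
    simp; omega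
  · simp

lemma rep_nil (old new : List Char) : rep old new [] = [] := by simp [rep]

lemma rep_pos {old : List Char} (new : List Char) {c : Char} {t : List Char}
    (h0 : old ≠ []) (h : old.isPrefixOf (c :: t) = true) :
    rep old new (c :: t) = new ++ rep old new (List.drop old.length (c :: t)) := by
  rw [rep]; simp [h0, h]

lemma rep_neg (old new : List Char) {c : Char} {t : List Char}
    (h : old.isPrefixOf (c :: t) = false) :
    rep old new (c :: t) = c :: rep old new t := by
  rw [rep]; simp [h]

lemma go_spec (old new : List Char) (h0 : old ≠ []) :
    ∀ (fuel : Nat) (l acc : List Char), l.length ≤ fuel →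
      PySem.Chars.replace.go old new fuel l acc = acc.reverse ++ rep old new l := by
  intro fuel
  induction fuel with
  | zero =>
    intro l acc h
    have hnil : l = [] := by cases l <;> simp_all
    subst hnil
    simp [PySem.Chars.replace.go, rep_nil]
  | succ n ih =>
    intro l acc h
    cases l with
    | nil => simp [PySem.Chars.replace.go, rep_nil]
    | cons c t =>
      have hgo : PySem.Chars.replace.go old new (n+1) (c::t) acc =
          if old.isPrefixOf (c::t) then
            PySem.Chars.replace.go old new n (List.drop old.length (c::t)) (new.reverse ++ acc)
          else PySem.Chars.replace.go old new n t (c :: acc) := by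
        simp [PySem.Chars.replace.go]
      by_cases hp : old.isPrefixOf (c::t) = true
      · have hlen : (List.drop old.length (c::t)).length ≤ n := by
          have := List.length_pos_of_ne_nil h0
          simp at h ⊢; omega
        rw [hgo, if_pos hp, ih _ _ hlen, rep_pos new h0 hp]
        simp
      · have hp' : old.isPrefixOf (c::t) = false := Bool.eq_false_iff.mpr hp
        rw [hgo, if_neg (by simp [hp']), ih t (c::acc) (by simp at h ⊢; omega),
          rep_neg old new hp']
        simp

lemma replace_eq_rep (l : List Char) (old new : List Char) (h0 : old ≠ []) :
    PySem.Chars.replace l old new = rep old new l := by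
  unfold PySem.Chars.replace
  rw [if_neg (by simp [h0])]
  simpa using go_spec old new h0 l.length l [] le_rfl

-- prefix computations
lemma pfx_cons_false (a c : Char) (as t : List Char) (h : (a == c) = false) :
    List.isPrefixOf (a :: as) (c :: t) = false := by
  rw [show List.isPrefixOf (a :: as) (c :: t) = (a == c && List.isPrefixOf as t) from rfl]
  simp [h]

lemma pfx_head_false {c : Char} (cs : List Char) {l : List Char} (h : l.head? ≠ some c) :
    List.isPrefixOf (c :: cs) l = false := by
  cases l with
  | nil => rfl
  | cons d t =>
    have hcd : (c == d) = false := by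
      simp only [beq_eq_false_iff_ne]; intro e; exact h (by simp [e])
    exact pfx_cons_false c d cs t hcd

lemma head_ne_of_pfx1_false {c : Char} {l : List Char}
    (h : List.isPrefixOf [c] l = false) : l.head? ≠ some c := by
  cases l with
  | nil => simp
  | cons d t =>
    rw [show List.isPrefixOf [c] (d :: t) = (c == d && List.isPrefixOf [] t) from rfl] at h
    simp at h
    simp [Ne.symm h]

lemma rep_skip (a c : Char) (as new t : List Char) (h : (a == c) = false) :
    rep (a :: as) new (c :: t) = c :: rep (a :: as) new t :=
  rep_neg _ _ (pfx_cons_false a c as t h)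

lemma rep_aya_hit (new r : List Char) :
    rep ['a','y','a'] new ('a'::'y'::'a'::r) = new ++ rep ['a','y','a'] new r := by
  rw [rep_pos new (by simp) (by rfl)]
  simp

lemma rep_ye_hit (new r : List Char) :
    rep ['y','e'] new ('y'::'e'::r) = new ++ rep ['y','e'] new r := by
  rw [rep_pos new (by simp) (by rfl)]
  simp

lemma rep_woo_hit (new r : List Char) :
    rep ['w','o','o'] new ('w'::'o'::'o'::r) = new ++ rep ['w','o','o'] new r := by
  rw [rep_pos new (by simp) (by rfl)]
  simp

lemma rep_ma_hit (new r : List Char) :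
    rep ['m','a'] new ('m'::'a'::r) = new ++ rep ['m','a'] new r := by
  rw [rep_pos new (by simp) (by rfl)]
  simp

lemma rep_one_hit (new r : List Char) :
    rep ['1'] new ('1'::r) = new ++ rep ['1'] new r := by
  rw [rep_pos new (by simp) (by rfl)]
  simp

lemma rep1_head (old : List Char) (l : List Char) (h0 : old ≠ []) :
    (rep old ['1'] l).head? = some '1' ∨ (rep old ['1'] l).head? = l.head? := by
  cases l with
  | nil => right; simp [rep_nil]
  | cons c t =>
    by_cases hp : old.isPrefixOf (c :: t) = true
    · left; rw [rep_pos _ h0 hp]; simp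
    · right; rw [rep_neg _ _ (Bool.eq_false_iff.mpr hp)]; simp

-- the per-word value A tests against "": four unit-replacement passes then '1'-deletion
def Fc (l : List Char) : List Char :=
  rep ['1'] [] (rep ['m','a'] ['1'] (rep ['w','o','o'] ['1'] (rep ['y','e'] ['1']
    (rep ['a','y','a'] ['1'] l))))

lemma Fc_one (r : List Char) : Fc ('1' :: r) = Fc r := by
  unfold Fc
  rw [rep_skip 'a' '1' _ _ _ (by decide), rep_skip 'y' '1' _ _ _ (by decide),
    rep_skip 'w' '1' _ _ _ (by decide), rep_skip 'm' '1' _ _ _ (by decide), rep_one_hit]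
  simp

lemma Fc_aya (r : List Char) : Fc ('a'::'y'::'a'::r) = Fc r := by
  unfold Fc
  rw [rep_aya_hit]
  simp only [List.singleton_append]
  rw [rep_skip 'y' '1' _ _ _ (by decide), rep_skip 'w' '1' _ _ _ (by decide),
    rep_skip 'm' '1' _ _ _ (by decide), rep_one_hit]
  simp

lemma Fc_ye (r : List Char) : Fc ('y'::'e'::r) = Fc r := by
  unfold Fc
  rw [rep_skip 'a' 'y' _ _ _ (by decide), rep_skip 'a' 'e' _ _ _ (by decide), rep_ye_hit]
  simp only [List.singleton_append]
  rw [rep_skip 'w' '1' _ _ _ (by decide), rep_skip 'm' '1' _ _ _ (by decide), rep_one_hit]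
  simp

lemma Fc_woo (r : List Char) : Fc ('w'::'o'::'o'::r) = Fc r := by
  unfold Fc
  rw [rep_skip 'a' 'w' _ _ _ (by decide), rep_skip 'a' 'o' _ _ _ (by decide),
    rep_skip 'a' 'o' _ _ _ (by decide), rep_skip 'y' 'w' _ _ _ (by decide),
    rep_skip 'y' 'o' _ _ _ (by decide), rep_skip 'y' 'o' _ _ _ (by decide), rep_woo_hit]
  simp only [List.singleton_append]
  rw [rep_skip 'm' '1' _ _ _ (by decide), rep_one_hit]
  simp

lemma Fc_ma (r : List Char) (h : List.isPrefixOf ['y','a'] r = false) :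
    Fc ('m'::'a'::r) = Fc r := by
  unfold Fc
  rw [rep_skip 'a' 'm' _ _ _ (by decide)]
  rw [rep_neg ['a','y','a'] ['1'] (c := 'a') (t := r)
    (by rw [show List.isPrefixOf ['a','y','a'] ('a'::r)
            = (('a' : Char) == 'a' && List.isPrefixOf ['y','a'] r) from rfl]
        simp [h])]
  rw [rep_skip 'y' 'm' _ _ _ (by decide), rep_skip 'y' 'a' _ _ _ (by decide),
    rep_skip 'w' 'm' _ _ _ (by decide), rep_skip 'w' 'a' _ _ _ (by decide), rep_ma_hit]
  simp only [List.singleton_append]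
  rw [rep_one_hit]
  simp

-- pass-through lemmas: A's pipeline keeps the head character, so the word is not counted
lemma Fc_pass {c : Char} (r : List Char) (ha : ('a' == c) = false) (hy : ('y' == c) = false)
    (hw : ('w' == c) = false) (hm : ('m' == c) = false) (h1 : (('1' : Char) == c) = false) :
    Fc (c :: r) = c :: Fc r := by
  unfold Fc
  rw [rep_skip 'a' c _ _ _ ha, rep_skip 'y' c _ _ _ hy, rep_skip 'w' c _ _ _ hw,
    rep_skip 'm' c _ _ _ hm, rep_skip '1' c _ _ _ h1]

lemma Fc_a_pass (r : List Char) (h : List.isPrefixOf ['y','a'] r = false) :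
    Fc ('a' :: r) = 'a' :: Fc r := by
  unfold Fc
  rw [rep_neg ['a','y','a'] ['1'] (c := 'a') (t := r)
    (by rw [show List.isPrefixOf ['a','y','a'] ('a'::r)
            = (('a' : Char) == 'a' && List.isPrefixOf ['y','a'] r) from rfl]
        simp [h])]
  rw [rep_skip 'y' 'a' _ _ _ (by decide), rep_skip 'w' 'a' _ _ _ (by decide),
    rep_skip 'm' 'a' _ _ _ (by decide), rep_skip '1' 'a' _ _ _ (by decide)]

lemma Fc_y_pass (r : List Char) (h : r.head? ≠ some 'e') :
    Fc ('y' :: r) = 'y' :: Fc r := by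
  have hhd : (rep ['a','y','a'] ['1'] r).head? ≠ some 'e' := by
    rcases rep1_head ['a','y','a'] r (by simp) with h' | h' <;> rw [h'] <;> simp [h]
  unfold Fc
  rw [rep_skip 'a' 'y' _ _ _ (by decide)]
  rw [rep_neg ['y','e'] ['1'] (c := 'y')
    (by rw [show List.isPrefixOf ['y','e'] ('y' :: (rep ['a','y','a'] ['1'] r))
            = (('y' : Char) == 'y' && List.isPrefixOf ['e'] (rep ['a','y','a'] ['1'] r)) from rfl]
        simp [pfx_head_false [] hhd])]
  rw [rep_skip 'w' 'y' _ _ _ (by decide), rep_skip 'm' 'y' _ _ _ (by decide),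
    rep_skip '1' 'y' _ _ _ (by decide)]

lemma Fc_w_pass (r : List Char) (h : List.isPrefixOf ['o','o'] r = false) :
    Fc ('w' :: r) = 'w' :: Fc r := by
  have hoo : List.isPrefixOf ['o','o'] (rep ['y','e'] ['1'] (rep ['a','y','a'] ['1'] r)) = false := by
    cases r with
    | nil => rw [rep_nil, rep_nil]; rfl
    | cons d r2 =>
      by_cases hd : d = 'o'
      · subst hd
        have hr2 : r2.head? ≠ some 'o' := by
          apply head_ne_of_pfx1_false
          rw [show List.isPrefixOf ['o','o'] ('o'::r2)
              = (('o' : Char) == 'o' && List.isPrefixOf ['o'] r2) from rfl] at h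
          simpa using h
        have hX : (rep ['y','e'] ['1'] (rep ['a','y','a'] ['1'] r2)).head? ≠ some 'o' := by
          rcases rep1_head ['y','e'] (rep ['a','y','a'] ['1'] r2) (by simp) with h' | h' <;> rw [h']
          · simp
          · rcases rep1_head ['a','y','a'] r2 (by simp) with h'' | h'' <;> rw [h'']
            · simp
            · exact hr2
        rw [rep_skip 'a' 'o' _ _ _ (by decide), rep_skip 'y' 'o' _ _ _ (by decide)]
        rw [show List.isPrefixOf ['o','o'] ('o' :: rep ['y','e'] ['1'] (rep ['a','y','a'] ['1'] r2))
            = (('o' : Char) == 'o' && List.isPrefixOf ['o'] (rep ['y','e'] ['1'] (rep ['a','y','a'] ['1'] r2))) from rfl]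
        simp [pfx_head_false [] hX]
      · have hX : (rep ['y','e'] ['1'] (rep ['a','y','a'] ['1'] (d :: r2))).head? ≠ some 'o' := by
          rcases rep1_head ['y','e'] (rep ['a','y','a'] ['1'] (d :: r2)) (by simp) with h' | h' <;> rw [h']
          · simp
          · rcases rep1_head ['a','y','a'] (d :: r2) (by simp) with h'' | h'' <;> rw [h'']
            · simp
            · simp [hd]
        exact pfx_head_false ['o'] hX
  unfold Fc
  rw [rep_skip 'a' 'w' _ _ _ (by decide), rep_skip 'y' 'w' _ _ _ (by decide)]
  rw [rep_neg ['w','o','o'] ['1'] (c := 'w')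
    (by rw [show List.isPrefixOf ['w','o','o'] ('w' :: (rep ['y','e'] ['1'] (rep ['a','y','a'] ['1'] r)))
            = (('w' : Char) == 'w' && List.isPrefixOf ['o','o'] (rep ['y','e'] ['1'] (rep ['a','y','a'] ['1'] r))) from rfl]
        simp [hoo])]
  rw [rep_skip 'm' 'w' _ _ _ (by decide), rep_skip '1' 'w' _ _ _ (by decide)]

lemma Fc_m_pass (r : List Char) (h : r.head? ≠ some 'a') :
    Fc ('m' :: r) = 'm' :: Fc r := by
  have hY : (rep ['w','o','o'] ['1'] (rep ['y','e'] ['1'] (rep ['a','y','a'] ['1'] r))).head? ≠ some 'a' := by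
    rcases rep1_head ['w','o','o'] (rep ['y','e'] ['1'] (rep ['a','y','a'] ['1'] r)) (by simp) with h' | h' <;> rw [h']
    · simp
    · rcases rep1_head ['y','e'] (rep ['a','y','a'] ['1'] r) (by simp) with h'' | h'' <;> rw [h'']
      · simp
      · rcases rep1_head ['a','y','a'] r (by simp) with h3 | h3 <;> rw [h3]
        · simp
        · exact h
  unfold Fc
  rw [rep_skip 'a' 'm' _ _ _ (by decide), rep_skip 'y' 'm' _ _ _ (by decide),
    rep_skip 'w' 'm' _ _ _ (by decide)]
  rw [rep_neg ['m','a'] ['1'] (c := 'm')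
    (by rw [show List.isPrefixOf ['m','a'] ('m' :: (rep ['w','o','o'] ['1'] (rep ['y','e'] ['1'] (rep ['a','y','a'] ['1'] r))))
            = (('m' : Char) == 'm' && List.isPrefixOf ['a'] (rep ['w','o','o'] ['1'] (rep ['y','e'] ['1'] (rep ['a','y','a'] ['1'] r)))) from rfl]
        simp [pfx_head_false [] hY])]
  rw [rep_skip '1' 'm' _ _ _ (by decide)]

lemma Fc_maya_ne (r : List Char) : Fc ('m'::'a'::'y'::'a'::r) ≠ [] := by
  unfold Fc
  rw [rep_skip 'a' 'm' _ _ _ (by decide), rep_aya_hit]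
  simp only [List.singleton_append]
  rw [rep_skip 'y' 'm' _ _ _ (by decide), rep_skip 'y' '1' _ _ _ (by decide),
    rep_skip 'w' 'm' _ _ _ (by decide), rep_skip 'w' '1' _ _ _ (by decide)]
  rw [rep_neg ['m','a'] ['1'] (c := 'm')
    (by rw [show List.isPrefixOf ['m','a'] ('m' :: '1' :: (rep ['w','o','o'] ['1'] (rep ['y','e'] ['1'] (rep ['a','y','a'] ['1'] r))))
            = (('m' : Char) == 'm' && (('a' : Char) == '1' && List.isPrefixOf [] (rep ['w','o','o'] ['1'] (rep ['y','e'] ['1'] (rep ['a','y','a'] ['1'] r))))) from rfl]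
        simp)]
  rw [rep_skip 'm' '1' _ _ _ (by decide), rep_skip '1' 'm' _ _ _ (by decide)]
  simp

-- the two Bool recognizers evaluate to false when no branch applies
lemma tiled1_eq_false (c : Char) (t : List Char) (h1 : c ≠ '1')
    (h2 : List.isPrefixOf ['a','y','a'] (c::t) = false)
    (h3 : List.isPrefixOf ['y','e'] (c::t) = false)
    (h4 : List.isPrefixOf ['w','o','o'] (c::t) = false)
    (h5 : List.isPrefixOf ['m','a'] (c::t) = false) :
    tiled1 (c :: t) = false := by
  rw [tiled1.eq_def]
  split <;> simp_all [List.isPrefixOf]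

lemma altLoop_eq_false (c : Char) (t : List Char)
    (h2 : List.isPrefixOf ['a','y','a'] (c::t) = false)
    (h3 : List.isPrefixOf ['y','e'] (c::t) = false)
    (h4 : List.isPrefixOf ['w','o','o'] (c::t) = false)
    (h5 : List.isPrefixOf ['m','a'] (c::t) = false) :
    altLoop (c :: t) = false := by
  rw [altLoop.eq_def]
  split <;> simp_all [List.isPrefixOf]

-- MAIN CHARACTERISATION: A's per-word pipeline yields "" exactly on tiled1 words
lemma Fc_empty_iff_aux : ∀ (n : Nat) (l : List Char), l.length ≤ n →
    ((Fc l = []) ↔ tiled1 l = true) := by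
  intro n
  induction n with
  | zero =>
    intro l hl
    have hnil : l = [] := by cases l <;> simp_all
    subst hnil
    simp [Fc, rep_nil, tiled1]
  | succ n ih =>
    intro l hl
    cases l with
    | nil => simp [Fc, rep_nil, tiled1]
    | cons c t =>
      by_cases h1 : c = '1'
      · subst h1
        rw [Fc_one, show tiled1 ('1'::t) = tiled1 t from rfl]
        exact ih t (by simp at hl; omega)
      by_cases h2 : List.isPrefixOf ['a','y','a'] (c::t) = true
      · obtain ⟨r, hr⟩ := List.isPrefixOf_iff_prefix.mp h2
        simp only [List.cons_append, List.nil_append, List.cons.injEq] at hr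
        obtain ⟨hc, ht⟩ := hr
        subst hc; subst ht
        rw [Fc_aya, show tiled1 ('a'::'y'::'a'::r) = tiled1 r from rfl]
        exact ih r (by simp at hl; omega)
      by_cases h3 : List.isPrefixOf ['y','e'] (c::t) = true
      · obtain ⟨r, hr⟩ := List.isPrefixOf_iff_prefix.mp h3
        simp only [List.cons_append, List.nil_append, List.cons.injEq] at hr
        obtain ⟨hc, ht⟩ := hr
        subst hc; subst ht
        rw [Fc_ye, show tiled1 ('y'::'e'::r) = tiled1 r from rfl]
        exact ih r (by simp at hl; omega)
      by_cases h4 : List.isPrefixOf ['w','o','o'] (c::t) = true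
      · obtain ⟨r, hr⟩ := List.isPrefixOf_iff_prefix.mp h4
        simp only [List.cons_append, List.nil_append, List.cons.injEq] at hr
        obtain ⟨hc, ht⟩ := hr
        subst hc; subst ht
        rw [Fc_woo, show tiled1 ('w'::'o'::'o'::r) = tiled1 r from rfl]
        exact ih r (by simp at hl; omega)
      by_cases h5 : List.isPrefixOf ['m','a'] (c::t) = true
      · obtain ⟨r, hr⟩ := List.isPrefixOf_iff_prefix.mp h5
        simp only [List.cons_append, List.nil_append, List.cons.injEq] at hr
        obtain ⟨hc, ht⟩ := hr
        subst hc; subst ht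
        by_cases hya : List.isPrefixOf ['y','a'] r = true
        · obtain ⟨r', hr'⟩ := List.isPrefixOf_iff_prefix.mp hya
          simp only [List.cons_append, List.nil_append] at hr'
          subst hr'
          have hA := Fc_maya_ne r'
          have hT : tiled1 ('m'::'a'::'y'::'a'::r') = false := by
            rw [show tiled1 ('m'::'a'::'y'::'a'::r') = tiled1 ('y'::'a'::r') from rfl]
            exact tiled1_eq_false 'y' ('a'::r') (by decide) (by simp [List.isPrefixOf])
              (by simp [List.isPrefixOf]) (by simp [List.isPrefixOf]) (by simp [List.isPrefixOf])
          rw [hT]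
          simp [hA]
        · have hya' : List.isPrefixOf ['y','a'] r = false := Bool.eq_false_iff.mpr hya
          rw [Fc_ma r hya', show tiled1 ('m'::'a'::r) = tiled1 r from rfl]
          exact ih r (by simp at hl; omega)
      -- no unit applies: A's pipeline keeps the head, the word is not tiled
      have h2' : List.isPrefixOf ['a','y','a'] (c::t) = false := Bool.eq_false_iff.mpr h2
      have h3' : List.isPrefixOf ['y','e'] (c::t) = false := Bool.eq_false_iff.mpr h3
      have h4' : List.isPrefixOf ['w','o','o'] (c::t) = false := Bool.eq_false_iff.mpr h4
      have h5' : List.isPrefixOf ['m','a'] (c::t) = false := Bool.eq_false_iff.mpr h5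
      rw [tiled1_eq_false c t h1 h2' h3' h4' h5']
      simp only [Bool.false_eq_true, iff_false]
      by_cases hca : c = 'a'
      · subst hca
        have hya : List.isPrefixOf ['y','a'] t = false := by
          rw [show List.isPrefixOf ['a','y','a'] ('a'::t)
              = (('a' : Char) == 'a' && List.isPrefixOf ['y','a'] t) from rfl] at h2'
          simpa using h2'
        rw [Fc_a_pass t hya]; simp
      by_cases hcy : c = 'y'
      · subst hcy
        have hhd : t.head? ≠ some 'e' := by
          apply head_ne_of_pfx1_false
          rw [show List.isPrefixOf ['y','e'] ('y'::t)
              = (('y' : Char) == 'y' && List.isPrefixOf ['e'] t) from rfl] at h3'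
          simpa using h3'
        rw [Fc_y_pass t hhd]; simp
      by_cases hcw : c = 'w'
      · subst hcw
        have hoo : List.isPrefixOf ['o','o'] t = false := by
          rw [show List.isPrefixOf ['w','o','o'] ('w'::t)
              = (('w' : Char) == 'w' && List.isPrefixOf ['o','o'] t) from rfl] at h4'
          simpa using h4'
        rw [Fc_w_pass t hoo]; simp
      by_cases hcm : c = 'm'
      · subst hcm
        have hhd : t.head? ≠ some 'a' := by
          apply head_ne_of_pfx1_false
          rw [show List.isPrefixOf ['m','a'] ('m'::t)
              = (('m' : Char) == 'm' && List.isPrefixOf ['a'] t) from rfl] at h5'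
          simpa using h5'
        rw [Fc_m_pass t hhd]; simp
      · rw [Fc_pass t (by simp [beq_eq_false_iff_ne]; exact fun e => hca e.symm)
          (by simp [beq_eq_false_iff_ne]; exact fun e => hcy e.symm)
          (by simp [beq_eq_false_iff_ne]; exact fun e => hcw e.symm)
          (by simp [beq_eq_false_iff_ne]; exact fun e => hcm e.symm)
          (by simp [beq_eq_false_iff_ne]; exact fun e => h1 e.symm)]
        simp

lemma Fc_empty_iff (l : List Char) : (Fc l = []) ↔ tiled1 l = true :=
  Fc_empty_iff_aux l.length l le_rfl

-- B accepts only words over the unit alphabet, so never a word containing '1'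
lemma altLoop_no_one_aux : ∀ (n : Nat) (l : List Char), l.length ≤ n →
    altLoop l = true → ('1' : Char) ∉ l := by
  intro n
  induction n with
  | zero =>
    intro l hl _
    have hnil : l = [] := by cases l <;> simp_all
    subst hnil; simp
  | succ n ih =>
    intro l hl halt
    cases l with
    | nil => simp
    | cons c t =>
      by_cases h2 : List.isPrefixOf ['a','y','a'] (c::t) = true
      · obtain ⟨r, hr⟩ := List.isPrefixOf_iff_prefix.mp h2
        simp only [List.cons_append, List.nil_append, List.cons.injEq] at hr
        obtain ⟨hc, ht⟩ := hr
        subst hc; subst ht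
        have := ih r (by simp at hl; omega) (by rwa [show altLoop ('a'::'y'::'a'::r) = altLoop r from rfl] at halt)
        simp [this]
      by_cases h3 : List.isPrefixOf ['y','e'] (c::t) = true
      · obtain ⟨r, hr⟩ := List.isPrefixOf_iff_prefix.mp h3
        simp only [List.cons_append, List.nil_append, List.cons.injEq] at hr
        obtain ⟨hc, ht⟩ := hr
        subst hc; subst ht
        have := ih r (by simp at hl; omega) (by rwa [show altLoop ('y'::'e'::r) = altLoop r from rfl] at halt)
        simp [this]
      by_cases h4 : List.isPrefixOf ['w','o','o'] (c::t) = true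
      · obtain ⟨r, hr⟩ := List.isPrefixOf_iff_prefix.mp h4
        simp only [List.cons_append, List.nil_append, List.cons.injEq] at hr
        obtain ⟨hc, ht⟩ := hr
        subst hc; subst ht
        have := ih r (by simp at hl; omega) (by rwa [show altLoop ('w'::'o'::'o'::r) = altLoop r from rfl] at halt)
        simp [this]
      by_cases h5 : List.isPrefixOf ['m','a'] (c::t) = true
      · obtain ⟨r, hr⟩ := List.isPrefixOf_iff_prefix.mp h5
        simp only [List.cons_append, List.nil_append, List.cons.injEq] at hr
        obtain ⟨hc, ht⟩ := hr
        subst hc; subst ht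
        have := ih r (by simp at hl; omega) (by rwa [show altLoop ('m'::'a'::r) = altLoop r from rfl] at halt)
        simp [this]
      · exfalso
        rw [altLoop_eq_false c t (Bool.eq_false_iff.mpr h2) (Bool.eq_false_iff.mpr h3) (Bool.eq_false_iff.mpr h4)
          (Bool.eq_false_iff.mpr h5)] at halt
        exact Bool.false_ne_true halt

lemma altLoop_no_one (l : List Char) (h : altLoop l = true) : ('1' : Char) ∉ l :=
  altLoop_no_one_aux l.length l le_rfl h

-- on '1'-free words the two recognizers agree
lemma tiled_eq_alt_aux : ∀ (n : Nat) (l : List Char), l.length ≤ n →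
    ('1' : Char) ∉ l → tiled1 l = altLoop l := by
  intro n
  induction n with
  | zero =>
    intro l hl _
    have hnil : l = [] := by cases l <;> simp_all
    subst hnil; rfl
  | succ n ih =>
    intro l hl hno
    cases l with
    | nil => rfl
    | cons c t =>
      have h1 : c ≠ '1' := by intro e; exact hno (by simp [e])
      have hnot : ('1' : Char) ∉ t := fun hm => hno (List.mem_cons_of_mem _ hm)
      by_cases h2 : List.isPrefixOf ['a','y','a'] (c::t) = true
      · obtain ⟨r, hr⟩ := List.isPrefixOf_iff_prefix.mp h2
        simp only [List.cons_append, List.nil_append, List.cons.injEq] at hr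
        obtain ⟨hc, ht⟩ := hr
        subst hc; subst ht
        rw [show tiled1 ('a'::'y'::'a'::r) = tiled1 r from rfl,
          show altLoop ('a'::'y'::'a'::r) = altLoop r from rfl]
        exact ih r (by simp at hl; omega) (fun hm => hnot (by simp [hm]))
      by_cases h3 : List.isPrefixOf ['y','e'] (c::t) = true
      · obtain ⟨r, hr⟩ := List.isPrefixOf_iff_prefix.mp h3
        simp only [List.cons_append, List.nil_append, List.cons.injEq] at hr
        obtain ⟨hc, ht⟩ := hr
        subst hc; subst ht
        rw [show tiled1 ('y'::'e'::r) = tiled1 r from rfl,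
          show altLoop ('y'::'e'::r) = altLoop r from rfl]
        exact ih r (by simp at hl; omega) (fun hm => hnot (by simp [hm]))
      by_cases h4 : List.isPrefixOf ['w','o','o'] (c::t) = true
      · obtain ⟨r, hr⟩ := List.isPrefixOf_iff_prefix.mp h4
        simp only [List.cons_append, List.nil_append, List.cons.injEq] at hr
        obtain ⟨hc, ht⟩ := hr
        subst hc; subst ht
        rw [show tiled1 ('w'::'o'::'o'::r) = tiled1 r from rfl,
          show altLoop ('w'::'o'::'o'::r) = altLoop r from rfl]
        exact ih r (by simp at hl; omega) (fun hm => hnot (by simp [hm]))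
      by_cases h5 : List.isPrefixOf ['m','a'] (c::t) = true
      · obtain ⟨r, hr⟩ := List.isPrefixOf_iff_prefix.mp h5
        simp only [List.cons_append, List.nil_append, List.cons.injEq] at hr
        obtain ⟨hc, ht⟩ := hr
        subst hc; subst ht
        rw [show tiled1 ('m'::'a'::r) = tiled1 r from rfl,
          show altLoop ('m'::'a'::r) = altLoop r from rfl]
        exact ih r (by simp at hl; omega) (fun hm => hnot (by simp [hm]))
      · rw [tiled1_eq_false c t h1 (Bool.eq_false_iff.mpr h2) (Bool.eq_false_iff.mpr h3) (Bool.eq_false_iff.mpr h4)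
          (Bool.eq_false_iff.mpr h5),
          altLoop_eq_false c t (Bool.eq_false_iff.mpr h2) (Bool.eq_false_iff.mpr h3) (Bool.eq_false_iff.mpr h4)
          (Bool.eq_false_iff.mpr h5)]

lemma tiled_eq_alt (l : List Char) (h : ('1' : Char) ∉ l) : tiled1 l = altLoop l :=
  tiled_eq_alt_aux l.length l le_rfl h

lemma alt_imp_tiled (l : List Char) (h : altLoop l = true) : tiled1 l = true := by
  rw [tiled_eq_alt l (altLoop_no_one l h)]; exact h

-- tiled1 recognises exactly the language of unitsRE
lemma tiled1_flatten : ∀ S : List (List Char),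
    (∀ y ∈ S, y = ['a','y','a'] ∨ y = ['y','e'] ∨ y = ['w','o','o'] ∨ y = ['m','a'] ∨ y = ['1']) →
    tiled1 S.flatten = true := by
  intro S
  induction S with
  | nil => intro _; rfl
  | cons p S ih =>
    intro hS
    have hrest := ih (fun y hy => hS y (List.mem_cons_of_mem _ hy))
    rcases hS p List.mem_cons_self with rfl | rfl | rfl | rfl | rfl <;>
      simpa [List.flatten_cons] using hrest

lemma tiled1_parts_aux : ∀ (n : Nat) (l : List Char), l.length ≤ n → tiled1 l = true →
    ∃ S : List (List Char), l = S.flatten ∧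
      ∀ y ∈ S, (y = ['a','y','a'] ∨ y = ['y','e'] ∨ y = ['w','o','o'] ∨ y = ['m','a'] ∨ y = ['1'])
        ∧ y ≠ [] := by
  intro n
  induction n with
  | zero =>
    intro l hl _
    have hnil : l = [] := by cases l <;> simp_all
    subst hnil
    exact ⟨[], rfl, by simp⟩
  | succ n ih =>
    intro l hl htl
    cases l with
    | nil => exact ⟨[], rfl, by simp⟩
    | cons c t =>
      by_cases h1 : c = '1'
      · subst h1
        obtain ⟨S, rfl, hS⟩ := ih t (by simp at hl; omega)
          (by rwa [show tiled1 ('1'::t) = tiled1 t from rfl] at htl)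
        refine ⟨['1'] :: S, by simp, ?_⟩
        rintro y hy
        rcases List.mem_cons.mp hy with rfl | hy'
        · exact ⟨Or.inr (Or.inr (Or.inr (Or.inr rfl))), by simp⟩
        · exact hS y hy'
      by_cases h2 : List.isPrefixOf ['a','y','a'] (c::t) = true
      · obtain ⟨r, hr⟩ := List.isPrefixOf_iff_prefix.mp h2
        simp only [List.cons_append, List.nil_append, List.cons.injEq] at hr
        obtain ⟨hc, ht⟩ := hr
        subst hc; subst ht
        obtain ⟨S, rfl, hS⟩ := ih r (by simp at hl; omega)
          (by rwa [show tiled1 ('a'::'y'::'a'::r) = tiled1 r from rfl] at htl)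
        refine ⟨['a','y','a'] :: S, by simp, ?_⟩
        rintro y hy
        rcases List.mem_cons.mp hy with rfl | hy'
        · exact ⟨Or.inl rfl, by simp⟩
        · exact hS y hy'
      by_cases h3 : List.isPrefixOf ['y','e'] (c::t) = true
      · obtain ⟨r, hr⟩ := List.isPrefixOf_iff_prefix.mp h3
        simp only [List.cons_append, List.nil_append, List.cons.injEq] at hr
        obtain ⟨hc, ht⟩ := hr
        subst hc; subst ht
        obtain ⟨S, rfl, hS⟩ := ih r (by simp at hl; omega)
          (by rwa [show tiled1 ('y'::'e'::r) = tiled1 r from rfl] at htl)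
        refine ⟨['y','e'] :: S, by simp, ?_⟩
        rintro y hy
        rcases List.mem_cons.mp hy with rfl | hy'
        · exact ⟨Or.inr (Or.inl rfl), by simp⟩
        · exact hS y hy'
      by_cases h4 : List.isPrefixOf ['w','o','o'] (c::t) = true
      · obtain ⟨r, hr⟩ := List.isPrefixOf_iff_prefix.mp h4
        simp only [List.cons_append, List.nil_append, List.cons.injEq] at hr
        obtain ⟨hc, ht⟩ := hr
        subst hc; subst ht
        obtain ⟨S, rfl, hS⟩ := ih r (by simp at hl; omega)
          (by rwa [show tiled1 ('w'::'o'::'o'::r) = tiled1 r from rfl] at htl)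
        refine ⟨['w','o','o'] :: S, by simp, ?_⟩
        rintro y hy
        rcases List.mem_cons.mp hy with rfl | hy'
        · exact ⟨Or.inr (Or.inr (Or.inl rfl)), by simp⟩
        · exact hS y hy'
      by_cases h5 : List.isPrefixOf ['m','a'] (c::t) = true
      · obtain ⟨r, hr⟩ := List.isPrefixOf_iff_prefix.mp h5
        simp only [List.cons_append, List.nil_append, List.cons.injEq] at hr
        obtain ⟨hc, ht⟩ := hr
        subst hc; subst ht
        obtain ⟨S, rfl, hS⟩ := ih r (by simp at hl; omega)
          (by rwa [show tiled1 ('m'::'a'::r) = tiled1 r from rfl] at htl)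
        refine ⟨['m','a'] :: S, by simp, ?_⟩
        rintro y hy
        rcases List.mem_cons.mp hy with rfl | hy'
        · exact ⟨Or.inr (Or.inr (Or.inr (Or.inl rfl))), by simp⟩
        · exact hS y hy'
      · rw [tiled1_eq_false c t h1 (Bool.eq_false_iff.mpr h2) (Bool.eq_false_iff.mpr h3)
          (Bool.eq_false_iff.mpr h4) (Bool.eq_false_iff.mpr h5)] at htl
        exact absurd htl (by simp)

lemma tiled1_iff_rmatch (l : List Char) : tiled1 l = true ↔ unitsRE.rmatch l = true := by
  rw [RegularExpression.rmatch_iff_matches']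
  unfold unitsRE
  rw [RegularExpression.matches'_star, Language.mem_kstar_iff_exists_nonempty]
  constructor
  · intro htl
    obtain ⟨S, rfl, hS⟩ := tiled1_parts_aux l.length l le_rfl htl
    exact ⟨S, rfl, fun y hy => ⟨(units_matches y).mpr (hS y hy).1, (hS y hy).2⟩⟩
  · rintro ⟨S, rfl, hS⟩
    exact tiled1_flatten S (fun y hy => (units_matches y).mp (hS y hy).1)

-- the per-word test of A's port, characterised
lemma word_cond (s : String) :
    (PySem.Str.replace (PySem.Str.replace (PySem.Str.replace (PySem.Str.replace
      (PySem.Str.replace s "aya" "1") "ye" "1") "woo" "1") "ma" "1") "1" "" = "")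
    ↔ tiled1 s.toList = true := by
  rw [show ((PySem.Str.replace (PySem.Str.replace (PySem.Str.replace (PySem.Str.replace
      (PySem.Str.replace s "aya" "1") "ye" "1") "woo" "1") "ma" "1") "1" "" = "")
      ↔ (PySem.Str.replace (PySem.Str.replace (PySem.Str.replace (PySem.Str.replace
      (PySem.Str.replace s "aya" "1") "ye" "1") "woo" "1") "ma" "1") "1" "").toList = [])
    from (String.toList_eq_nil_iff).symm]
  simp only [PySem.Str.toList_replace]
  rw [show ("aya" : String).toList = ['a','y','a'] from by decide,
    show ("ye" : String).toList = ['y','e'] from by decide,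
    show ("woo" : String).toList = ['w','o','o'] from by decide,
    show ("ma" : String).toList = ['m','a'] from by decide,
    show ("1" : String).toList = ['1'] from by decide,
    show ("" : String).toList = [] from by decide]
  rw [replace_eq_rep _ _ _ (by simp), replace_eq_rep _ _ _ (by simp),
    replace_eq_rep _ _ _ (by simp), replace_eq_rep _ _ _ (by simp),
    replace_eq_rep _ _ _ (by simp)]
  exact Fc_empty_iff s.toList

lemma solution_eq (babbling : List String) :
    solution babbling = (babbling.countP (fun w => tiled1 w.toList) : Int) := by
  unfold solution
  simp only [List.foldl_cons, List.foldl_nil]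
  simp only [word_cond]
  simpa using PySem.List.foldl_if_add_one (fun (w : String) => tiled1 w.toList) babbling 0

lemma alt_eq (babbling : List String) :
    solution_alt babbling = (babbling.countP (fun w => altLoop w.toList) : Int) := by
  unfold solution_alt
  simpa using PySem.List.foldl_if_add_one (fun (w : String) => altLoop w.toList) babbling 0

-- a strict count comparison for the tight claim
lemma countP_lt_of {α : Type} (p q : α → Bool) :
    ∀ l : List α, (∀ a ∈ l, q a = true → p a = true) →
      (∃ a, a ∈ l ∧ p a = true ∧ q a = false) → l.countP q < l.countP p := by
  intro l
  induction l with
  | nil => rintro _ ⟨a, ha, _⟩; cases ha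
  | cons b l ih =>
    rintro hmono ⟨a, ha, hp, hq⟩
    rw [List.countP_cons, List.countP_cons]
    rcases List.mem_cons.mp ha with rfl | ha'
    · have hle : List.countP q l ≤ List.countP p l :=
        List.countP_mono_left (fun x hx hqx => hmono x (List.mem_cons_of_mem _ hx) hqx)
      simp [hp, hq]; omega
    · have h2 := ih (fun x hx => hmono x (List.mem_cons_of_mem _ hx)) ⟨a, ha', hp, hq⟩
      have hb : (if q b = true then 1 else 0) ≤ (if p b = true then 1 else 0) := by
        by_cases hqb : q b = true
        · simp [hqb, hmono b List.mem_cons_self hqb]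
        · simp [hqb]
      omega

-- ===== VERDICT (by name: the statements are the Claim_ definitions above) =====
theorem solution_spec : Claim_unchanged_solution := by
  intro babbling _
  intro hnD
  rw [solution_eq, alt_eq]
  congr 1
  apply List.countP_congr
  intro w hw
  by_cases hmem : ('1' : Char) ∈ w.toList
  · have hT : tiled1 w.toList = false := by
      cases hcase : tiled1 w.toList
      · rfl
      · exact absurd ⟨w, hw, hmem, (tiled1_iff_rmatch _).mp hcase⟩ hnD
    have hB : altLoop w.toList = false := by
      cases hcase : altLoop w.toList
      · rfl
      · exact absurd (altLoop_no_one _ hcase) (by simp [hmem])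
    simp [hT, hB]
  · rw [tiled_eq_alt _ hmem]

theorem solution_changed : Claim_changed_solution := by
  unfold Claim_changed_solution; decide

theorem solution_tight : Claim_exact_solution := by
  intro babbling _ hD
  obtain ⟨w, hw, hmem, htm⟩ := hD
  have ht : tiled1 w.toList = true := (tiled1_iff_rmatch _).mpr htm
  rw [solution_eq, alt_eq]
  have hq : altLoop w.toList = false := by
    cases hcase : altLoop w.toList
    · rfl
    · exact absurd (altLoop_no_one _ hcase) (by simp [hmem])
  have hlt := countP_lt_of (fun w => tiled1 w.toList) (fun w => altLoop w.toList) babbling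
    (fun a _ hqa => alt_imp_tiled a.toList hqa) ⟨w, hw, ht, hq⟩
  intro heq
  have : babbling.countP (fun w => tiled1 w.toList) = babbling.countP (fun w => altLoop w.toList) := by
    exact_mod_cast heq
  omega
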